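-- pv_equiv track=rewrite | github.com/TheDaniel418/IsopGem | shared/services/number_properties_service.py | ternary_to_conrune
-- ===== SOURCE A (Python) =====
-- def ternary_to_conrune(ternary_str: str) -> int:
--     """
--     Convert a ternary string to its conrune value.
--
--     Args:
--         ternary_str: The ternary representation as a string
--
--     Returns:
--         The conrune value
--     """
--     if not ternary_str:
--         return 0
--
--     conrune = 0
--     for digit in ternary_str:
--         if digit == '1':
--             conrune += 1
--         elif digit == '2':
--             conrune -= 1
--
--     return conrune
-- ===== SOURCE B (Python) =====
-- def ternary_to_conrune(ternary_str: str) -> int: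
--     """Conrune value by divide and conquer: the value of a string is the sum
--     of the values of its two halves; a single digit is worth +1 ('1'), -1 ('2'), else 0."""
--     n = len(ternary_str)
--     if n == 0:
--         return 0
--     if n == 1:
--         if ternary_str == '1':
--             return 1
--         if ternary_str == '2':
--             return -1
--         return 0
--     mid = n // 2
--     return ternary_to_conrune(ternary_str[:mid]) + ternary_to_conrune(ternary_str[mid:])
-- ===== Notes on version B (the rewrite author's own statement) =====
-- stated objective: alternative
-- what changed: Replaces A's single left-to-right accumulating loop by a divide-and-conquer recursion: split the string at the midpoint, recurse on both halves and add, with single digits as base cases (+1 for '1', -1 for '2', 0 otherwise); correct because the digit sum is associative.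
import Mathlib
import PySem

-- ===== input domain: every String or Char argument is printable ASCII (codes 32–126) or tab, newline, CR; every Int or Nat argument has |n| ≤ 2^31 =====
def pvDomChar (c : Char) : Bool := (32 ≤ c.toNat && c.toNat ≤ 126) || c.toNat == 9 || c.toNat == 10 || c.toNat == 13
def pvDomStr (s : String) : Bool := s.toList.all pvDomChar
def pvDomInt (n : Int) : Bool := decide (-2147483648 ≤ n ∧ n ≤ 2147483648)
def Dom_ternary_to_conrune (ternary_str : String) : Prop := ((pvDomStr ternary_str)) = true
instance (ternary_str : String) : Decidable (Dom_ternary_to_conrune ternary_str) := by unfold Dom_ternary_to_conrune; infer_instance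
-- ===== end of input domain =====

-- B replaces A's single accumulating loop by a divide-and-conquer recursion on string halves
-- (same return value; an alternative decomposition, not claimed faster).


-- ===== PORT A =====
-- `if not ternary_str: return 0` then a single loop accumulating +1 on '1', -1 on '2'.
def ternary_to_conrune (ternary_str : String) : Int :=
  if ternary_str.toList.isEmpty then 0
  else
    ternary_str.toList.foldl
      (fun conrune digit =>
        if digit == '1' then conrune + 1
        else if digit == '2' then conrune - 1
        else conrune) 0

-- ===== PORT B =====
-- Divide and conquer on the list of characters: s[:mid] = take mid, s[mid:] = drop mid.
def conruneGo (l : List Char) : Int :=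
  if l.length = 0 then 0
  else if l.length = 1 then
    (if l = ['1'] then 1 else if l = ['2'] then -1 else 0)
  else
    conruneGo (l.take (l.length / 2)) + conruneGo (l.drop (l.length / 2))
termination_by l.length
decreasing_by
  · simp; omega
  · simp; omega

def ternary_to_conrune_alt (ternary_str : String) : Int :=
  conruneGo ternary_str.toList

-- ===== PRECONDITION & SPEC =====
def Spec_ternary_to_conrune (ternary_str : String) (out : Int) : Prop := out = ternary_to_conrune_alt ternary_str
instance (ternary_str : String) (out : Int) : Decidable (Spec_ternary_to_conrune ternary_str out) := by unfold Spec_ternary_to_conrune; infer_instance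

-- ===== CLAIM (what is proved, stated in full; the proofs are below) =====
def Claim_equal_ternary_to_conrune : Prop := ∀ (ternary_str : String), Dom_ternary_to_conrune ternary_str → Spec_ternary_to_conrune ternary_str (ternary_to_conrune ternary_str)

-- ===== LEMMAS AND PROOFS =====

-- B's divide-and-conquer computes count '1' minus count '2'.
lemma conruneGo_eq (l : List Char) :
    conruneGo l = (l.count '1' : Int) - (l.count '2' : Int) := by
  fun_induction conruneGo l with
  | case1 l h =>
    have : l = [] := List.length_eq_zero_iff.mp h
    simp [this]
  | case2 h0 h1 => simp
  | case3 h0 h1 h2 => simp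
  | case4 l h0 h1 h2 h3 =>
    obtain ⟨c, hc⟩ := List.length_eq_one_iff.mp h1
    subst hc
    simp at h2 h3
    simp [h2, h3]
  | case5 l h0 h1 ih2 ih1 =>
    rw [ih1, ih2]
    conv_rhs => rw [← List.take_append_drop (l.length / 2) l]
    rw [List.count_append, List.count_append]
    push_cast
    ring

-- A's loop computes count '1' minus count '2'.
lemma foldA (l : List Char) : ∀ (acc : Int),
    l.foldl (fun conrune digit =>
        if digit == '1' then conrune + 1
        else if digit == '2' then conrune - 1
        else conrune) acc
      = acc + (l.count '1' : Int) - (l.count '2' : Int) := by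
  induction l with
  | nil => intro acc; simp
  | cons x t ih =>
    intro acc
    simp only [List.foldl_cons, List.count_cons, ih]
    by_cases h1 : x = '1' <;> by_cases h2 : x = '2' <;>
      simp [h1, h2] <;> omega

-- ===== VERDICT (by name: the statement is the Claim_ definition above) =====
theorem ternary_to_conrune_spec : Claim_equal_ternary_to_conrune := by
  intro s _
  unfold Spec_ternary_to_conrune ternary_to_conrune ternary_to_conrune_alt
  rw [conruneGo_eq]
  by_cases he : s.toList.isEmpty
  · have hnil : s.toList = [] := by simpa using he
    simp [hnil]
  · rw [if_neg (by simpa using he), foldA]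
    simp
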